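-- pv_equiv track=rewrite | github.com/niclasgriesshaber/llm_patent_pipeline | src/benchmarking/scripts/core/benchmarking.py | create_availability_summary
-- ===== SOURCE A (Python) =====
-- from typing import List, Tuple, Dict, Any
--
-- def create_availability_summary(file_matrix: Dict) -> str:
--     """Create file availability summary."""
--     total_files = len(file_matrix)
--     perfect_available = sum(1 for data in file_matrix.values() if 'perfect' in data['available'])
--     llm_available = sum(1 for data in file_matrix.values() if 'llm' in data['available'])
--     student_available = sum(1 for data in file_matrix.values() if 'student' in data['available'])
--     all_three_available = sum(1 for data in file_matrix.values() if len(data['available']) == 3)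
--     files_with_at_least_two = sum(1 for data in file_matrix.values() if len(data['available']) >= 2)
--     files_processed = files_with_at_least_two
--
--     return f'''
--     <div class="availability-summary">
--         <h2>File Availability Summary</h2>
--         <p><strong>Total files:</strong> {total_files}</p>
--         <p><strong>Perfect transcriptions available:</strong> {perfect_available}</p>
--         <p><strong>LLM-generated transcriptions available:</strong> {llm_available}</p>
--         <p><strong>Student transcriptions available:</strong> {student_available}</p>
--     </div>
--     '''
-- ===== SOURCE B (Python) =====
-- def create_availability_summary(file_matrix):
--     """Create file availability summary (table-first: one frequency table over category tags)."""
--     counts = {}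
--     for data in file_matrix.values():
--         for tag in set(data['available']):
--             counts[tag] = counts.get(tag, 0) + 1
--     return f'''
--     <div class="availability-summary">
--         <h2>File Availability Summary</h2>
--         <p><strong>Total files:</strong> {len(file_matrix)}</p>
--         <p><strong>Perfect transcriptions available:</strong> {counts.get('perfect', 0)}</p>
--         <p><strong>LLM-generated transcriptions available:</strong> {counts.get('llm', 0)}</p>
--         <p><strong>Student transcriptions available:</strong> {counts.get('student', 0)}</p>
--     </div>
--     '''
-- ===== Notes on version B (the rewrite author's own statement) =====
-- stated objective: idiomatic
-- what changed: Replaces four separate membership-scan passes over all values with a single traversal that builds one frequency table over each file's deduplicated category tags, then reads the three counts from the table; the unused sums of A are dropped.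
import Mathlib
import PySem

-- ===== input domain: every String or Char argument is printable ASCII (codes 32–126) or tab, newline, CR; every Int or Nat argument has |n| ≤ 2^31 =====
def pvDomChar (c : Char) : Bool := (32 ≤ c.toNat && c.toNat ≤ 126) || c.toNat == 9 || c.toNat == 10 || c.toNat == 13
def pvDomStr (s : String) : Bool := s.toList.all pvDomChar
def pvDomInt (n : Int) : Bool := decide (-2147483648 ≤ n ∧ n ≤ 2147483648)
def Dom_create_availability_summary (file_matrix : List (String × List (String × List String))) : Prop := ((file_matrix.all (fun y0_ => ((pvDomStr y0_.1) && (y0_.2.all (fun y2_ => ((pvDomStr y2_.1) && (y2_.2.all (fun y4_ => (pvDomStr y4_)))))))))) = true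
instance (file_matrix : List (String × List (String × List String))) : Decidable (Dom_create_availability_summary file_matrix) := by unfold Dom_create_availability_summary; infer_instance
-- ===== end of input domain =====

-- B builds one frequency table over each file's deduplicated category tags in a single
-- traversal instead of A's four separate membership-scan passes (objective: idiomatic).


-- ===== PORT A =====
-- the shared HTML template (both Pythons contain the identical f-string literal)
def pvHtml (total perfect llm student : Int) : String :=
  "\n    <div class=\"availability-summary\">\n        <h2>File Availability Summary</h2>\n        <p><strong>Total files:</strong> " ++ PySem.Int.toStr total ++
  "</p>\n        <p><strong>Perfect transcriptions available:</strong> " ++ PySem.Int.toStr perfect ++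
  "</p>\n        <p><strong>LLM-generated transcriptions available:</strong> " ++ PySem.Int.toStr llm ++
  "</p>\n        <p><strong>Student transcriptions available:</strong> " ++ PySem.Int.toStr student ++
  "</p>\n    </div>\n    "

def create_availability_summary (file_matrix : List (String × List (String × List String))) : String :=
  let total_files : Int := file_matrix.length
  let values := file_matrix.map (fun kv => kv.2)
  let perfect_available : Int := values.foldl
    (fun acc data => if "perfect" ∈ (PySem.Dict.mk data).getD "available" [] then acc + 1 else acc) 0
  let llm_available : Int := values.foldl
    (fun acc data => if "llm" ∈ (PySem.Dict.mk data).getD "available" [] then acc + 1 else acc) 0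
  let student_available : Int := values.foldl
    (fun acc data => if "student" ∈ (PySem.Dict.mk data).getD "available" [] then acc + 1 else acc) 0
  -- A also computes all_three_available / files_with_at_least_two / files_processed; they are
  -- unused in the returned string, transliterated here and likewise unused
  let _all_three_available : Int := values.foldl
    (fun acc data => if ((PySem.Dict.mk data).getD "available" []).length == 3 then acc + 1 else acc) 0
  let _files_with_at_least_two : Int := values.foldl
    (fun acc data => if ((PySem.Dict.mk data).getD "available" []).length ≥ 2 then acc + 1 else acc) 0
  pvHtml total_files perfect_available llm_available student_available

-- ===== PORT B =====
def create_availability_summary_alt (file_matrix : List (String × List (String × List String))) : String :=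
  let counts : PySem.Dict String Int := (file_matrix.map (fun kv => kv.2)).foldl
    (fun c data =>
      (PySem.Set.ofList ((PySem.Dict.mk data).getD "available" [])).foldl
        (fun c tag => c.insert tag (c.getD tag 0 + 1)) c)
    PySem.Dict.empty
  pvHtml (file_matrix.length) (counts.getD "perfect" 0) (counts.getD "llm" 0) (counts.getD "student" 0)

-- ===== PRECONDITION & SPEC =====
-- Pre_ excludes association lists with duplicate keys at either level (a Python dict cannot
-- carry them) and files whose inner dict lacks the "available" key, on which A raises KeyError.
def Pre_create_availability_summary (file_matrix : List (String × List (String × List String))) : Prop :=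
  (file_matrix.map (fun kv => kv.1)).Nodup ∧
  ∀ kv ∈ file_matrix, (kv.2.map (fun p => p.1)).Nodup ∧ "available" ∈ kv.2.map (fun p => p.1)
instance (file_matrix : List (String × List (String × List String))) : Decidable (Pre_create_availability_summary file_matrix) := by unfold Pre_create_availability_summary; infer_instance
def pvWitness_create_availability_summary : (List (String × List (String × List String))) :=
  [("a", [("available", ["perfect", "llm"])]), ("b", [("available", [])])]
def Spec_create_availability_summary (file_matrix : List (String × List (String × List String))) (out : String) : Prop := out = create_availability_summary_alt file_matrix
instance (file_matrix : List (String × List (String × List String))) (out : String) : Decidable (Spec_create_availability_summary file_matrix out) := by unfold Spec_create_availability_summary; infer_instance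

-- ===== CLAIM (what is proved, stated in full; the proofs are below) =====
def Claim_equal_create_availability_summary : Prop := ∀ (file_matrix : List (String × List (String × List String))), Dom_create_availability_summary file_matrix → Pre_create_availability_summary file_matrix → Spec_create_availability_summary file_matrix (create_availability_summary file_matrix)

-- ===== LEMMAS AND PROOFS =====

-- B's counter, read at tag t, counts the values whose available-list contains t
theorem counter_getD (t : String) (vs : List (List (String × List String)))
    (c : PySem.Dict String Int) :
    (vs.foldl (fun c data =>
        (PySem.Set.ofList ((PySem.Dict.mk data).getD "available" [])).foldl
          (fun c tag => c.insert tag (c.getD tag 0 + 1)) c) c).getD t 0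
      = c.getD t 0 + (vs.countP (fun data => t ∈ (PySem.Dict.mk data).getD "available" []) : Int) := by
  induction vs generalizing c with
  | nil => simp
  | cons d rest ih =>
    simp only [List.foldl_cons, ih, List.countP_cons,
      PySem.Dict.getD_foldl_insert_add_one]
    have hn : (PySem.Set.ofList ((PySem.Dict.mk d).getD "available" [])).Nodup :=
      PySem.Set.nodup_ofList _
    by_cases hm : t ∈ (PySem.Dict.mk d).getD "available" []
    · have h1 : (PySem.Set.ofList ((PySem.Dict.mk d).getD "available" [])).count t = 1 :=
        List.count_eq_one_of_mem hn (by simpa [PySem.Set.mem_ofList] using hm)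
      rw [h1]
      simp [hm]
      ring
    · have : (PySem.Set.ofList ((PySem.Dict.mk d).getD "available" [])).count t = 0 :=
        List.count_eq_zero.mpr (by simpa [PySem.Set.mem_ofList] using hm)
      simp [this, hm]

-- A's membership-scan pass is the same count
theorem scan_count (t : String) (vs : List (List (String × List String))) :
    vs.foldl (fun acc data =>
        if t ∈ (PySem.Dict.mk data).getD "available" [] then acc + 1 else acc) (0 : Int)
      = (vs.countP (fun data => t ∈ (PySem.Dict.mk data).getD "available" []) : Int) := by
  simpa using PySem.List.foldl_ite_add_one
    (p := fun data => t ∈ (PySem.Dict.mk data).getD "available" []) vs 0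

-- ===== VERDICT (by name: the statement is the Claim_ definition above) =====
theorem create_availability_summary_spec : Claim_equal_create_availability_summary := by
  intro fm _ _
  show create_availability_summary fm = create_availability_summary_alt fm
  unfold create_availability_summary create_availability_summary_alt
  simp only [counter_getD, scan_count, PySem.Dict.getD_empty, zero_add]
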